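-- pv_equiv track=rewrite | github.com/ftorrio/Agente-Pods | src/detectors/annotation_detector.py | _determine_overall_sentiment
-- ===== SOURCE A (Python) =====
-- from typing import Dict, Any, List
--
-- def _determine_overall_sentiment(annotations: List[Dict[str, Any]]) -> str:
--     """
--     Determina el sentimiento general basado en todas las anotaciones
--
--     Args:
--         annotations: Lista de anotaciones
--
--     Returns:
--         Sentimiento general
--     """
--     if not annotations:
--         return 'neutral'
--
--     sentiments = [ann['sentiment'] for ann in annotations]
--
--     positive_count = sentiments.count('positive')
--     negative_count = sentiments.count('negative')
--
--     if negative_count > 0: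
--         # Si hay alguna negativa, el sentimiento general es negativo
--         return 'negative'
--     elif positive_count > 0:
--         return 'positive'
--     else:
--         return 'neutral'
-- ===== SOURCE B (Python) =====
-- from typing import Dict, Any, List
--
-- _RANK = {'negative': 2, 'positive': 1}
-- _LABELS = ('neutral', 'positive', 'negative')
--
-- def _determine_overall_sentiment(annotations: List[Dict[str, Any]]) -> str:
--     # Severity-rank formulation: map each sentiment to a numeric severity,
--     # take the maximum, and map the maximum back to its label.
--     if not annotations:
--         return 'neutral'
--     worst = max(_RANK.get(ann['sentiment'], 0) for ann in annotations)
--     return _LABELS[worst]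
-- ===== Notes on version B (the rewrite author's own statement) =====
-- stated objective: simpler
-- what changed: Replaces the counting/branching logic by an arithmetic max over a severity ranking (negative=2, positive=1, other=0) and a table lookup to map the maximum back to a label.
import Mathlib
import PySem

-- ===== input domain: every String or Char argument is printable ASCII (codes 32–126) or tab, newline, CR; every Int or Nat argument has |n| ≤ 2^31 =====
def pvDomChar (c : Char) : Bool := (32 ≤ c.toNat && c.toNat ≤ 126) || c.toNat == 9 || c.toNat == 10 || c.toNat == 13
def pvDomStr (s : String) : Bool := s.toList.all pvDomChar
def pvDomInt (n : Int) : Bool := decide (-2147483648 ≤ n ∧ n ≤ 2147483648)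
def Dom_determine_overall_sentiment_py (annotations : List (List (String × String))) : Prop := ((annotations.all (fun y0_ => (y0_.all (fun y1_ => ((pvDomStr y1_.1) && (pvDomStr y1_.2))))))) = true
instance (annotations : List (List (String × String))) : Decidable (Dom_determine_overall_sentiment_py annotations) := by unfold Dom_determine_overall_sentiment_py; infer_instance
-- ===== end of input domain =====

-- B replaces A's counting and branch chain by a max over a severity ranking plus a table lookup (objective: simpler).

-- ===== PORT A =====
-- ann['sentiment'] ported as (.lookup "sentiment").getD ""; Pre_ excludes the KeyError case, where the default is never used.
def determine_overall_sentiment_py (annotations : List (List (String × String))) : String :=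
  if annotations.isEmpty then "neutral"
  else
    let sentiments := annotations.map (fun ann => (ann.lookup "sentiment").getD "")
    let positive_count := PySem.List.count sentiments "positive"
    let negative_count := PySem.List.count sentiments "negative"
    if negative_count > 0 then "negative"
    else if positive_count > 0 then "positive"
    else "neutral"

-- ===== PORT B =====
-- _RANK.get(s, 0)
def pvRank (s : String) : Int :=
  PySem.Dict.getD (PySem.Dict.ofList [("negative", (2 : Int)), ("positive", 1)]) s 0

def determine_overall_sentiment_py_alt (annotations : List (List (String × String))) : String :=
  if annotations.isEmpty then "neutral"
  else
    -- max(...) over the generator; guarded nonempty, so the .getD 0 default is never used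
    let worst := (PySem.List.max?
      (annotations.map (fun ann => pvRank ((ann.lookup "sentiment").getD ""))) (fun y => y)).getD 0
    -- _LABELS[worst]; worst ∈ {0,1,2} so the index is always in range and .getD "" is never used
    (PySem.List.pyGet? ["neutral", "positive", "negative"] worst).getD ""

-- ===== PRECONDITION & SPEC =====
-- A raises KeyError on any annotation without a 'sentiment' key; Pre_ excludes exactly those inputs.
def Pre_determine_overall_sentiment_py (annotations : List (List (String × String))) : Prop :=
  ∀ ann ∈ annotations, (ann.lookup "sentiment").isSome
instance (annotations : List (List (String × String))) : Decidable (Pre_determine_overall_sentiment_py annotations) := by unfold Pre_determine_overall_sentiment_py; infer_instance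
def pvWitness_determine_overall_sentiment_py : (List (List (String × String))) := ([[("sentiment", "positive")], [("sentiment", "neutral")]])
def Spec_determine_overall_sentiment_py (annotations : List (List (String × String))) (out : String) : Prop := out = determine_overall_sentiment_py_alt annotations
instance (annotations : List (List (String × String))) (out : String) : Decidable (Spec_determine_overall_sentiment_py annotations out) := by unfold Spec_determine_overall_sentiment_py; infer_instance

-- ===== CLAIM =====
def Claim_equal_determine_overall_sentiment_py : Prop := ∀ (annotations : List (List (String × String))), Dom_determine_overall_sentiment_py annotations → Pre_determine_overall_sentiment_py annotations → Spec_determine_overall_sentiment_py annotations (determine_overall_sentiment_py annotations)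

-- ===== LEMMAS AND PROOFS =====

-- pvRank's three values, by the key's identity.
theorem pv_rank_neg : pvRank "negative" = 2 := by decide
theorem pv_rank_pos : pvRank "positive" = 1 := by decide
theorem pv_rank_other (s : String) (hn : s ≠ "negative") (hp : s ≠ "positive") : pvRank s = 0 := by
  have hd : PySem.Dict.ofList [("negative", (2 : Int)), ("positive", 1)]
      = PySem.Dict.mk [("negative", 2), ("positive", 1)] := by decide
  simp [pvRank, PySem.Dict.getD, hd, PySem.Dict.get?,
    beq_eq_false_iff_ne.mpr (Ne.symm hn), beq_eq_false_iff_ne.mpr (Ne.symm hp)]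

-- foldl max commutes an element out of the accumulator.
theorem pv_foldl_max_comm (l : List Int) (a b : Int) :
    l.foldl max (max a b) = max a (l.foldl max b) := by
  induction l generalizing b with
  | nil => simp
  | cons x t ih => simpa [max_assoc] using ih (max b x)

def pvSent (ann : List (String × String)) : String := (ann.lookup "sentiment").getD ""

-- Characterisation of the running max of ranks started at 0.
theorem pv_M (l : List (List (String × String))) :
    (l.map (fun ann => pvRank (pvSent ann))).foldl max 0
      = (if l.any (fun ann => pvSent ann == "negative") then 2
         else if l.any (fun ann => pvSent ann == "positive") then 1 else 0) := by
  induction l with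
  | nil => simp
  | cons a t ih =>
    have h : (t.map (fun ann => pvRank (pvSent ann))).foldl max (max 0 (pvRank (pvSent a)))
        = max (pvRank (pvSent a)) ((t.map (fun ann => pvRank (pvSent ann))).foldl max 0) := by
      rw [max_comm]; exact pv_foldl_max_comm _ _ _
    simp only [List.map_cons, List.foldl_cons, List.any_cons, h, ih]
    by_cases hn : pvSent a = "negative"
    · simp only [hn, pv_rank_neg, beq_self_eq_true, Bool.true_or, if_true]
      split_ifs <;> decide
    · by_cases hp : pvSent a = "positive"
      · simp only [hp, pv_rank_pos, beq_self_eq_true, Bool.true_or,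
          beq_eq_false_iff_ne.mpr (show "positive" ≠ "negative" by decide), Bool.false_or]
        split_ifs <;> decide
      · simp only [pv_rank_other _ hn hp, beq_eq_false_iff_ne.mpr hn,
          beq_eq_false_iff_ne.mpr hp, Bool.false_or]
        split_ifs <;> decide

-- A's branch condition "count > 0" equals "some element has that sentiment".
theorem pv_cond (l : List (List (String × String))) (v : String) :
    (0 < PySem.List.count (l.map (fun ann => (ann.lookup "sentiment").getD "")) v)
    = ((l.any (fun ann => pvSent ann == v)) = true) := by
  simp only [PySem.List.count, pvSent, List.count_pos_iff, List.mem_map,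
    List.any_eq_true, beq_iff_eq]

theorem determine_overall_sentiment_py_spec : Claim_equal_determine_overall_sentiment_py := by
  intro annotations _ _
  unfold Spec_determine_overall_sentiment_py determine_overall_sentiment_py determine_overall_sentiment_py_alt
  cases annotations with
  | nil => rfl
  | cons a t =>
    simp only [List.isEmpty_cons, Bool.false_eq_true, if_false]
    have h0 : ((a :: t).map (fun ann => pvRank ((ann.lookup "sentiment").getD ""))).foldl max 0
        = (t.map (fun ann => pvRank ((ann.lookup "sentiment").getD ""))).foldl max
            (pvRank ((a.lookup "sentiment").getD "")) := by
      simp only [List.map_cons, List.foldl_cons]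
      congr 1
      have : (0 : Int) ≤ pvRank ((a.lookup "sentiment").getD "") := by
        by_cases hn : (a.lookup "sentiment").getD "" = "negative"
        · simp [hn, pv_rank_neg]
        · by_cases hp : (a.lookup "sentiment").getD "" = "positive"
          · simp [hp, pv_rank_pos]
          · simp [pv_rank_other _ hn hp]
      omega
    have hM := pv_M (a :: t)
    simp only [pvSent] at hM
    simp only [gt_iff_lt]
    simp only [pv_cond]
    rw [List.map_cons, PySem.List.max?_id_cons, Option.getD_some, ← h0, hM]
    simp only [pvSent]
    split_ifs <;> decide
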